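-- pv_equiv track=rewrite | github.com/chaos-git/coding-practice | leetcode/algorithms/trapping-rain-water.py | compute_hidden
-- ===== SOURCE A (Python) =====
-- def compute_hidden(heights, index, step):
--     shadow = 0
--     max_height = 0
--     while index >= 0 and index < len(heights):
--         if heights[index] > max_height:
--             max_height = heights[index]
--         else:
--             shadow += max_height - heights[index]
--             index += step
--     return (shadow, max_height)
-- ===== SOURCE B (Python) =====
-- def compute_hidden(heights, index, step):
--     n = len(heights)
--     if index < 0 or index >= n:
--         return (0, 0)
--     if step > 0:
--         k = -((index - n) // step)      # ceil((n - index) / step) trips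
--     else:
--         k = index // (-step) + 1        # trips until the index drops below 0
--     seq = [heights[index + j * step] for j in range(k)]
--     maxes = []
--     m = 0
--     for h in seq:
--         m = max(m, h)
--         maxes.append(m)
--     shadow = sum(mm - h for mm, h in zip(maxes, seq))
--     return (shadow, m)
-- ===== Notes on version B (the rewrite author's own statement) =====
-- stated objective: alternative
-- what changed: A's single stateful while-loop (which revisits an index after each new maximum and never advances then) is replaced by a closed-form trip count via floor division, a direct index comprehension, a prefix-maximum table and a zip/sum aggregation.
import Mathlib
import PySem

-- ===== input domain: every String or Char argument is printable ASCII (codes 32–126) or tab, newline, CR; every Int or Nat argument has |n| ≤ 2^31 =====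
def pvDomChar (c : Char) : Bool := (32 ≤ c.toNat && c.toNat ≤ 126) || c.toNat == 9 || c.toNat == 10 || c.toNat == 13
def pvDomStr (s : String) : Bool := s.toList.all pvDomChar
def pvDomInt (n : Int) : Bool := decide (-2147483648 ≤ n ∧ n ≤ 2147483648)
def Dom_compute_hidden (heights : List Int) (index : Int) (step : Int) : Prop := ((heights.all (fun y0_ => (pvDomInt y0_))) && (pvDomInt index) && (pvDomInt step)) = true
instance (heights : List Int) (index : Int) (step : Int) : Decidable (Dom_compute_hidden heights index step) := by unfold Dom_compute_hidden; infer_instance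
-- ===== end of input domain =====

-- B replaces A's single stateful while-loop by a closed-form trip count plus a prefix-max
-- table and a zip/sum aggregation (objective: alternative decomposition, same cost).

-- ===== PORT A =====
-- A's while-loop; fuel 2*len+1 suffices whenever step ≠ 0 (each position is visited at
-- most twice), proved below; with step = 0 and an in-range index the Python loops forever
-- (outside Pre_), where this port just stops.
def aLoop (heights : List Int) (step : Int) : Nat → Int → Int → Int → Int × Int
  | 0, _, shadow, mx => (shadow, mx)
  | fuel + 1, index, shadow, mx =>
    if 0 ≤ index ∧ index < (heights.length : Int) then
      let h := PySem.List.pyGetD heights index 0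
      if h > mx then aLoop heights step fuel index shadow h
      else aLoop heights step fuel (index + step) (shadow + (mx - h)) mx
    else (shadow, mx)

def compute_hidden (heights : List Int) (index : Int) (step : Int) : Int × Int :=
  aLoop heights step (2 * heights.length + 1) index 0 0

-- ===== PORT B =====
-- the trip count k of Source B
def bK (n index step : Int) : Int :=
  if step > 0 then -(PySem.Int.floordiv (index - n) step)
  else PySem.Int.floordiv index (-step) + 1

-- the body of Source B's prefix-max loop (state: maxes table so far, running max m)
def pmF (acc : List Int × Int) (h : Int) : List Int × Int :=
  (acc.1 ++ [max acc.2 h], max acc.2 h)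

-- Source B after the early return: build seq, fold the prefix-max table, zip-and-sum
def bAgg (seq : List Int) : Int × Int :=
  (((seq.foldl pmF ([], 0)).1.zip seq).foldl (fun s p => s + (p.1 - p.2)) 0,
   (seq.foldl pmF ([], 0)).2)

def compute_hidden_alt (heights : List Int) (index : Int) (step : Int) : Int × Int :=
  if index < 0 ∨ index ≥ (heights.length : Int) then (0, 0)
  else bAgg ((PySem.List.pyRange 0 (bK (heights.length : Int) index step) 1).map
               (fun j => PySem.List.pyGetD heights (index + j * step) 0))

-- ===== PRECONDITION & SPEC =====
-- Pre_ excludes only step = 0 with an in-range index: there A's while-loop never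
-- terminates (index is never advanced out of range), and B divides by zero.
def Pre_compute_hidden (heights : List Int) (index : Int) (step : Int) : Prop :=
  step ≠ 0 ∨ index < 0 ∨ (heights.length : Int) ≤ index
instance (heights : List Int) (index : Int) (step : Int) : Decidable (Pre_compute_hidden heights index step) := by unfold Pre_compute_hidden; infer_instance

def pvWitness_compute_hidden : List Int × Int × Int := ([3, 0, 2, 1], 0, 1)

def Spec_compute_hidden (heights : List Int) (index : Int) (step : Int) (out : Int × Int) : Prop := out = compute_hidden_alt heights index step
instance (heights : List Int) (index : Int) (step : Int) (out : Int × Int) : Decidable (Spec_compute_hidden heights index step out) := by unfold Spec_compute_hidden; infer_instance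

-- ===== CLAIM (what is proved, stated in full; the proofs are below) =====
def Claim_equal_compute_hidden : Prop := ∀ (heights : List Int) (index : Int) (step : Int), Dom_compute_hidden heights index step → Pre_compute_hidden heights index step → Spec_compute_hidden heights index step (compute_hidden heights index step)

-- ===== LEMMAS AND PROOFS =====

-- one abstract visit step: what A's loop does, net, per visited position
def stepFn (sm : Int × Int) (h : Int) : Int × Int :=
  if h > sm.2 then (sm.1, h) else (sm.1 + (sm.2 - h), sm.2)

-- the list of heights A visits starting at `index`, r visits long
def seqFrom (heights : List Int) (step : Int) : Int → Nat → List Int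
  | _, 0 => []
  | index, r + 1 => PySem.List.pyGetD heights index 0 :: seqFrom heights step (index + step) r

-- trip count (meaningful for step ≠ 0, index in range): matches B's k
def rc (n index step : Int) : Int := bK n index step

def rcN (heights : List Int) (index step : Int) : Nat :=
  if 0 ≤ index ∧ index < (heights.length : Int) then (rc (heights.length : Int) index step).toNat else 0

lemma rc_pos (n index step : Int) (hs : step ≠ 0) (h0 : 0 ≤ index) (h1 : index < n) :
    1 ≤ rc n index step := by
  unfold rc bK
  rcases lt_trichotomy step 0 with hlt | heq | hgt
  · rw [if_neg (by omega)]
    have := Int.ediv_nonneg h0 (by omega : (0:Int) ≤ -step)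
    rw [PySem.Int.floordiv_eq_ediv_of_pos (by omega)]
    omega
  · omega
  · rw [if_pos hgt, PySem.Int.floordiv_eq_ediv_of_pos hgt]
    have := Int.ediv_neg_of_neg_of_pos (by omega : index - n < 0) hgt
    omega

lemma rc_le (n index step : Int) (hs : step ≠ 0) (h0 : 0 ≤ index) (h1 : index < n) :
    rc n index step ≤ n := by
  unfold rc bK
  rcases lt_trichotomy step 0 with hlt | heq | hgt
  · rw [if_neg (by omega), PySem.Int.floordiv_eq_ediv_of_pos (by omega)]
    have := Int.ediv_le_self (-step) h0
    omega
  · omega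
  · rw [if_pos hgt, PySem.Int.floordiv_eq_ediv_of_pos hgt]
    have hle : index - n ≤ (index - n) / step := by
      rw [Int.le_ediv_iff_mul_le hgt]
      nlinarith
    omega

lemma rc_dec (n index step : Int) (hs : step ≠ 0) (h0 : 0 ≤ index) (h1 : index < n)
    (h2 : 0 ≤ index + step) (h3 : index + step < n) :
    rc n (index + step) step = rc n index step - 1 := by
  unfold rc bK
  rcases lt_trichotomy step 0 with hlt | heq | hgt
  · rw [if_neg (by omega), if_neg (by omega),
      PySem.Int.floordiv_eq_ediv_of_pos (by omega : (0:Int) < -step),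
      PySem.Int.floordiv_eq_ediv_of_pos (by omega : (0:Int) < -step)]
    have := Int.add_mul_ediv_right index (-1) (by omega : -step ≠ 0)
    have he : index + step = index + -1 * -step := by ring
    rw [he]
    omega
  · omega
  · rw [if_pos hgt, if_pos hgt, PySem.Int.floordiv_eq_ediv_of_pos hgt,
      PySem.Int.floordiv_eq_ediv_of_pos hgt]
    have := Int.add_mul_ediv_right (index - n) 1 (by omega : step ≠ 0)
    have he : index + step - n = index - n + 1 * step := by ring
    rw [he]
    omega

lemma rc_last (n index step : Int) (hs : step ≠ 0) (h0 : 0 ≤ index) (h1 : index < n)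
    (hout : ¬ (0 ≤ index + step ∧ index + step < n)) :
    rc n index step = 1 := by
  unfold rc bK
  rcases lt_trichotomy step 0 with hlt | heq | hgt
  · rw [if_neg (by omega), PySem.Int.floordiv_eq_ediv_of_pos (by omega : (0:Int) < -step)]
    have hlt2 : index < -step := by omega
    rw [Int.ediv_eq_zero_of_lt h0 hlt2]
    norm_num
  · omega
  · rw [if_pos hgt, PySem.Int.floordiv_eq_ediv_of_pos hgt]
    have hge : n ≤ index + step := by omega
    have := Int.add_mul_ediv_right (index - n) 1 (by omega : step ≠ 0)
    have hz : (index - n + 1 * step) / step = 0 :=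
      Int.ediv_eq_zero_of_lt (by omega) (by omega)
    omega

lemma aLoop_eq (heights : List Int) (step : Int) (hs : step ≠ 0) :
    ∀ (r : Nat) (index shadow mx : Int) (fuel : Nat), 2 * r ≤ fuel →
    rcN heights index step = r →
    aLoop heights step fuel index shadow mx
      = (seqFrom heights step index r).foldl stepFn (shadow, mx) := by
  intro r
  induction r with
  | zero =>
    intro index shadow mx fuel _ hr
    have hout : ¬ (0 ≤ index ∧ index < (heights.length : Int)) := by
      intro hin
      have h1 := rc_pos (heights.length : Int) index step hs hin.1 hin.2
      unfold rcN at hr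
      rw [if_pos hin] at hr
      omega
    cases fuel with
    | zero => simp [aLoop, seqFrom]
    | succ f => simp [aLoop, if_neg hout, seqFrom]
  | succ r ih =>
    intro index shadow mx fuel hfuel hr
    have hin : 0 ≤ index ∧ index < (heights.length : Int) := by
      by_contra hc
      unfold rcN at hr
      rw [if_neg hc] at hr
      omega
    have hrc : rc (heights.length : Int) index step = (r : Int) + 1 := by
      have h1 := rc_pos (heights.length : Int) index step hs hin.1 hin.2
      unfold rcN at hr
      rw [if_pos hin] at hr
      omega
    have hnext : rcN heights (index + step) step = r := by
      unfold rcN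
      by_cases hin2 : 0 ≤ index + step ∧ index + step < (heights.length : Int)
      · rw [if_pos hin2, rc_dec (heights.length : Int) index step hs hin.1 hin.2 hin2.1 hin2.2, hrc]
        omega
      · rw [if_neg hin2]
        have := rc_last (heights.length : Int) index step hs hin.1 hin.2 hin2
        omega
    obtain ⟨f, rfl⟩ : ∃ f, fuel = f + 1 := ⟨fuel - 1, by omega⟩
    set h := PySem.List.pyGetD heights index 0 with hh
    rw [show seqFrom heights step index (r + 1)
          = h :: seqFrom heights step (index + step) r from rfl, List.foldl_cons]
    by_cases hgt : h > mx
    · obtain ⟨f', rfl⟩ : ∃ f', f = f' + 1 := ⟨f - 1, by omega⟩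
      have e1 : aLoop heights step (f' + 1 + 1) index shadow mx
          = aLoop heights step (f' + 1) index shadow h := by
        simp only [aLoop, if_pos hin, ← hh]
        rw [if_pos hgt]
      have e2 : aLoop heights step (f' + 1) index shadow h
          = aLoop heights step f' (index + step) (shadow + (h - h)) h := by
        simp only [aLoop, if_pos hin, ← hh]
        rw [if_neg (by omega : ¬ h > h)]
      rw [e1, e2, show shadow + (h - h) = shadow from by ring,
        ih (index + step) shadow h f' (by omega) hnext]
      have : stepFn (shadow, mx) h = (shadow, h) := by
        unfold stepFn; rw [if_pos hgt]
      rw [this]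
    · have e1 : aLoop heights step (f + 1) index shadow mx
          = aLoop heights step f (index + step) (shadow + (mx - h)) mx := by
        simp only [aLoop, if_pos hin, ← hh]
        rw [if_neg hgt]
      rw [e1, ih (index + step) (shadow + (mx - h)) mx f (by omega) hnext]
      have : stepFn (shadow, mx) h = (shadow + (mx - h), mx) := by
        unfold stepFn; rw [if_neg hgt]
      rw [this]

-- B's visit list equals seqFrom
lemma range_seq (heights : List Int) (step : Int) :
    ∀ (r : Nat) (index : Int),
    (List.range r).map (fun k : Nat => PySem.List.pyGetD heights (index + (k : Int) * step) 0)
      = seqFrom heights step index r := by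
  intro r
  induction r with
  | zero => intro index; rfl
  | succ r ih =>
    intro index
    rw [List.range_succ_eq_map]
    simp only [List.map_cons, List.map_map]
    rw [show seqFrom heights step index (r + 1)
          = PySem.List.pyGetD heights index 0 :: seqFrom heights step (index + step) r from rfl]
    congr 1
    · norm_num
    · rw [← ih (index + step)]
      apply List.map_congr_left
      intro k _
      simp only [Function.comp_apply]
      congr 1
      push_cast
      ring

-- the prefix-max fold only appends to its list accumulator
lemma pm_append (seq : List Int) :
    ∀ (pre : List Int) (m : Int),
    seq.foldl pmF (pre, m)
      = (pre ++ (seq.foldl pmF ([], m)).1, (seq.foldl pmF ([], m)).2) := by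
  induction seq with
  | nil => intro pre m; simp
  | cons h t ih =>
    intro pre m
    simp only [List.foldl_cons, pmF, List.nil_append]
    rw [ih (pre ++ [max m h]) (max m h), ih [max m h] (max m h)]
    simp

-- B's two-pass aggregation equals the one-pass stepFn fold
lemma b_main (seq : List Int) :
    ∀ (m s : Int),
    (((seq.foldl pmF ([], m)).1.zip seq).foldl (fun s p => s + (p.1 - p.2)) s,
     (seq.foldl pmF ([], m)).2)
      = seq.foldl stepFn (s, m) := by
  induction seq with
  | nil => intro m s; simp
  | cons h t ih =>
    intro m s
    simp only [List.foldl_cons, pmF, List.nil_append]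
    rw [pm_append t [max m h] (max m h)]
    simp only [List.cons_append, List.nil_append, List.zip_cons_cons, List.foldl_cons]
    rw [ih (max m h) (s + (max m h - h))]
    have : stepFn (s, m) h = (s + (max m h - h), max m h) := by
      unfold stepFn
      by_cases hc : h ≤ m
      · rw [if_neg (by simpa using not_lt.mpr hc), max_eq_left hc]
      · rw [if_pos (by simpa using lt_of_not_ge hc), max_eq_right (le_of_not_ge hc)]
        have he : s + (h - h) = s := by ring
        rw [he]
    rw [this]

-- ===== VERDICT (by name: the statement is the Claim_ definition above) =====
theorem compute_hidden_spec : Claim_equal_compute_hidden := by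
  intro heights index step _ hpre
  unfold Spec_compute_hidden compute_hidden compute_hidden_alt
  by_cases hin : 0 ≤ index ∧ index < (heights.length : Int)
  · have hs : step ≠ 0 := by
      rcases hpre with h | h | h
      · exact h
      · omega
      · omega
    rw [if_neg (by omega : ¬ (index < 0 ∨ index ≥ (heights.length : Int)))]
    have hrc1 := rc_pos (heights.length : Int) index step hs hin.1 hin.2
    have hrc2 := rc_le (heights.length : Int) index step hs hin.1 hin.2
    have hrcN : rcN heights index step = (rc (heights.length : Int) index step).toNat := by
      unfold rcN; rw [if_pos hin]
    set r : Nat := (rc (heights.length : Int) index step).toNat with hrdef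
    have hk : bK (heights.length : Int) index step = (r : Int) := by
      rw [hrdef]
      unfold rc at hrc1 ⊢
      omega
    rw [hk, PySem.List.pyRange_one]
    have hcast : (((r : Int)) - 0).toNat = r := by omega
    rw [hcast, List.map_map]
    have hfun : ((fun j => PySem.List.pyGetD heights (index + j * step) 0) ∘ (fun k : Nat => (0 : Int) + (k : Int)))
        = fun k : Nat => PySem.List.pyGetD heights (index + (k : Int) * step) 0 := by
      funext k
      simp only [Function.comp_apply, zero_add]
    rw [hfun, range_seq heights step r index]
    rw [aLoop_eq heights step hs r index 0 0 (2 * heights.length + 1) (by omega) hrcN]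
    unfold bAgg
    exact (b_main (seqFrom heights step index r) 0 0).symm
  · rw [if_pos (by omega : index < 0 ∨ index ≥ (heights.length : Int))]
    simp only [aLoop, if_neg hin]
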